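-- pv_equiv track=rewrite | github.com/hseunggi/courseassistant | project/ingest_data.py | split_multiline_row_by_time
-- ===== SOURCE A (Python) =====
-- def split_multiline_row_by_time(row, col_index):
--
--     time_idx = col_index["time_str"]
--     raw_time = row[time_idx] if time_idx < len(row) else ""
--
--     if raw_time is None:
--         raw_time = ""
--
--     time_lines = [t.strip() for t in str(raw_time).split("\n") if t.strip()]
--
--     if str(raw_time).strip() == "":
--         single = {}
--         for key, idx in col_index.items():
--             val = row[idx] if idx < len(row) else ""
--             single[key] = (str(val).strip() if val is not None else "")
--         return [single]
--
--
--
--     count = len(time_lines)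
--
--     extracted_cols = {}
--     for key, idx in col_index.items():
--         val = row[idx] if idx < len(row) else ""
--         if val is None:
--             val = ""
--
--         lines = [v.strip() for v in str(val).split("\n") if v.strip()]
--
--         # 최소 1개의 값은 유지
--         if len(lines) == 0:
--             lines = ["-"]
--
--         extracted_cols[key] = lines
--
--     splitted = []
--
--     for i in range(count):
--         new_row = {}
--         for key, lines in extracted_cols.items():
--
--             # 줄 수가 충분할 때
--             if len(lines) >= count:
--                 val = lines[i]
--
--             # 단일 값(모든 row 공유)
--             elif len(lines) == 1:
--                 val = lines[0]
--
--             # 줄이 부족하면 마지막 줄 반복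
--             else:
--                 val = lines[-1]
--
--             new_row[key] = val
--
--         splitted.append(new_row)
--
--     return splitted
-- ===== SOURCE B (Python) =====
-- def split_multiline_row_by_time(row, col_index):
--     def text(idx):
--         v = row[idx] if idx < len(row) else ""
--         return "" if v is None else str(v)
--
--     raw_time = text(col_index["time_str"])
--     if raw_time.strip() == "":
--         return [{k: text(i).strip() for k, i in col_index.items()}]
--
--     count = sum(1 for t in raw_time.split("\n") if t.strip())
--
--     # Each column becomes a stream: its full line list when it can supply one
--     # line per output row (it then advances), otherwise the single line every
--     # row shares (the last line, or '-' when the cell is blank).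
--     streams = {}
--     for key, idx in col_index.items():
--         lines = [v.strip() for v in text(idx).split("\n") if v.strip()]
--         if len(lines) >= count:
--             streams[key] = (lines, True)
--         else:
--             streams[key] = ([lines[-1] if lines else "-"], False)
--
--     # Emit rows by taking every stream's head, then advancing the moving ones.
--     out = []
--     for _ in range(count):
--         out.append({k: s[0] for k, (s, _adv) in streams.items()})
--         streams = {k: (s[1:] if adv else s, adv) for k, (s, adv) in streams.items()}
--     return out
-- ===== Notes on version B (the rewrite author's own statement) =====
-- stated objective: alternative
-- what changed: B replaces A's indexed row loop with its three-way per-cell branch by a stream consumption: each column is classified once as advancing (enough lines) or constant (a single shared line), and rows are produced by repeatedly emitting every stream's head and advancing the moving streams - no index arithmetic or padding decision inside the row loop.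
import Mathlib
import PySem

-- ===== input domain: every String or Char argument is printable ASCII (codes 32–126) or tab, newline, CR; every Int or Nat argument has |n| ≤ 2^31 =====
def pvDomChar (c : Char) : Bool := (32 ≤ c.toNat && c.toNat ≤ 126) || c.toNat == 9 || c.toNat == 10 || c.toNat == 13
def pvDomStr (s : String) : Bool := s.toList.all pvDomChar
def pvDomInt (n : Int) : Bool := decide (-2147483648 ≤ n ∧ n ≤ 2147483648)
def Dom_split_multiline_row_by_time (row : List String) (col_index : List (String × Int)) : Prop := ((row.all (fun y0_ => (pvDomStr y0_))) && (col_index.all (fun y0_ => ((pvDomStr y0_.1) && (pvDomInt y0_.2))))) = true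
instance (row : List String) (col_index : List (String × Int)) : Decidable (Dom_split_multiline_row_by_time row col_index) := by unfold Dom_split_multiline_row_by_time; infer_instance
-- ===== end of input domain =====

-- B replaces A's indexed row loop (and its three-way per-cell branch) by stream consumption:
-- each column is classified once as advancing or constant, and rows are emitted by taking
-- stream heads and advancing the moving streams (objective: alternative decomposition, same cost).

-- ===== PORT A =====
-- row[idx] if idx < len(row) else ""  (row holds strings, never None; pyGetD's default is only
-- reached where Python would raise IndexError, which Pre_ excludes)
def pvCellA (row : List String) (idx : Int) : String :=
  if idx < (row.length : Int) then PySem.List.pyGetD row idx "" else ""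

-- [t.strip() for t in str(s).split("\n") if t.strip()]
def pvLinesA (s : String) : List String :=
  (((PySem.Str.split? s "\n").getD []).filter (fun t => PySem.Str.strip t != "")).map PySem.Str.strip

-- if len(lines) == 0: lines = ["-"]
def pvDefaultA (lines : List String) : List String :=
  if lines.length = 0 then ["-"] else lines

-- the three-way branch choosing the value of cell (key, i) from that column's lines
def pvValA (lines : List String) (count : Nat) (i : Int) : String :=
  if lines.length ≥ count then PySem.List.pyGetD lines i ""
  else if lines.length = 1 then PySem.List.pyGetD lines 0 ""
  else PySem.List.pyGetD lines (-1) ""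

def split_multiline_row_by_time (row : List String) (col_index : List (String × Int)) : List (List (String × String)) :=
  let d := PySem.Dict.ofList col_index
  let time_idx := (d.get? "time_str").getD 0   -- KeyError (no "time_str") is excluded by Pre_
  let raw_time := pvCellA row time_idx
  let time_lines := pvLinesA raw_time
  if PySem.Str.strip raw_time = "" then
    [(d.items.foldl (fun (single : PySem.Dict String String) kv =>
        single.insert kv.1 (PySem.Str.strip (pvCellA row kv.2))) PySem.Dict.empty).items]
  else
    let count := time_lines.length
    let extracted_cols := d.items.foldl (fun (ec : PySem.Dict String (List String)) kv =>
        ec.insert kv.1 (pvDefaultA (pvLinesA (pvCellA row kv.2)))) PySem.Dict.empty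
    (PySem.List.pyRange 0 (count : Int) 1).foldl (fun splitted i =>
      splitted ++ [(extracted_cols.items.foldl (fun (new_row : PySem.Dict String String) kl =>
        new_row.insert kl.1 (pvValA kl.2 count i)) PySem.Dict.empty).items]) []

-- ===== PORT B =====
-- text(idx): row[idx] if idx < len(row) else "" (strings are never None)
def pvCellB (row : List String) (idx : Int) : String :=
  if idx < (row.length : Int) then PySem.List.pyGetD row idx "" else ""

-- [v.strip() for v in text(idx).split("\n") if v.strip()]
def pvLinesB (s : String) : List String :=
  (((PySem.Str.split? s "\n").getD []).filter (fun v => PySem.Str.strip v != "")).map PySem.Str.strip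

-- (lines, True) if it can supply one line per row, else ([lines[-1] if lines else "-"], False)
def pvStreamB (lines : List String) (count : Nat) : List String × Bool :=
  if lines.length ≥ count then (lines, true)
  else ([if lines = [] then "-" else PySem.List.pyGetD lines (-1) ""], false)

-- streams = {k: (s[1:] if adv else s, adv) for k, (s, adv) in streams.items()}
def pvAdvanceB (st : List (String × (List String × Bool))) : List (String × (List String × Bool)) :=
  st.map (fun kv => (kv.1, (if kv.2.2 then PySem.List.slice kv.2.1 (some 1) none else kv.2.1, kv.2.2)))

-- the 'for _ in range(count)' loop: emit every stream's head, then advance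
def pvLoopB : Nat → List (String × (List String × Bool)) → List (List (String × String))
  | 0, _ => []
  | n+1, st =>
      (st.map (fun kv => (kv.1, PySem.List.pyGetD kv.2.1 0 ""))) :: pvLoopB n (pvAdvanceB st)

def split_multiline_row_by_time_alt (row : List String) (col_index : List (String × Int)) : List (List (String × String)) :=
  let d := PySem.Dict.ofList col_index
  let raw_time := pvCellB row ((d.get? "time_str").getD 0)
  if PySem.Str.strip raw_time = "" then
    [(d.items.foldl (fun (out : PySem.Dict String String) kv =>
        out.insert kv.1 (PySem.Str.strip (pvCellB row kv.2))) PySem.Dict.empty).items]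
  else
    -- count = sum(1 for t in raw_time.split("\n") if t.strip())
    let count := ((PySem.Str.split? raw_time "\n").getD []).countP (fun t => PySem.Str.strip t != "")
    let streams := d.items.foldl (fun (st : PySem.Dict String (List String × Bool)) kv =>
        st.insert kv.1 (pvStreamB (pvLinesB (pvCellB row kv.2)) count)) PySem.Dict.empty
    pvLoopB count streams.items

-- ===== PRECONDITION & SPEC =====
-- Pre_ excludes exactly the inputs on which the Python A raises: a col_index without a
-- "time_str" key (KeyError) and a used column index below -len(row) (IndexError).
def Pre_split_multiline_row_by_time (row : List String) (col_index : List (String × Int)) : Prop :=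
  "time_str" ∈ col_index.map Prod.fst ∧
  ∀ kv ∈ (PySem.Dict.ofList col_index).items, -(row.length : Int) ≤ kv.2
instance (row : List String) (col_index : List (String × Int)) : Decidable (Pre_split_multiline_row_by_time row col_index) := by unfold Pre_split_multiline_row_by_time; infer_instance

def pvWitness_split_multiline_row_by_time : List String × (List (String × Int)) :=
  (["09:00\n10:00", "a\nb", "r1"], [("time_str", 0), ("subject", 1), ("room", 2)])

def Spec_split_multiline_row_by_time (row : List String) (col_index : List (String × Int)) (out : List (List (String × String))) : Prop := out = split_multiline_row_by_time_alt row col_index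
instance (row : List String) (col_index : List (String × Int)) (out : List (List (String × String))) : Decidable (Spec_split_multiline_row_by_time row col_index out) := by unfold Spec_split_multiline_row_by_time; infer_instance

-- ===== CLAIM (what is proved, stated in full; the proofs are below) =====
def Claim_equal_split_multiline_row_by_time : Prop := ∀ (row : List String) (col_index : List (String × Int)), Dom_split_multiline_row_by_time row col_index → Pre_split_multiline_row_by_time row col_index → Spec_split_multiline_row_by_time row col_index (split_multiline_row_by_time row col_index)

-- ===== LEMMAS AND PROOFS =====

-- B's loop, characterised: row i takes stream heads, advancing streams i times
theorem pv_loop_eq (n : Nat) (st : List (String × (List String × Bool))) :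
    pvLoopB n st = (List.range n).map (fun i => st.map (fun kv =>
      (kv.1, if kv.2.2 then kv.2.1.getD i "" else kv.2.1.getD 0 ""))) := by
  induction n generalizing st with
  | zero => simp [pvLoopB]
  | succ n ih =>
    rw [pvLoopB, List.range_succ_eq_map, List.map_cons, ih]
    congr 1
    · apply List.map_congr_left
      intro kv _
      rcases h : kv.2.2 <;> simp [PySem.List.pyGetD_zero]
    · rw [List.map_map]
      apply List.map_congr_left
      intro i _
      simp only [Function.comp, pvAdvanceB, List.map_map]
      apply List.map_congr_left
      intro kv _
      rcases h : kv.2.2 with _ | _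
      · simp [h]
      · simp only [h, if_pos, Function.comp]
        have : PySem.List.slice kv.2.1 (some ((1:Nat):Int)) none = kv.2.1.drop 1 :=
          PySem.List.slice_from_natCast kv.2.1 1
        simp only [Nat.cast_one] at this
        simp [this]

-- A's per-cell three-way branch equals reading B's stream for that column
theorem pv_cell_eq (lines0 : List String) (count k : Nat) (hk : k < count) :
    pvValA (pvDefaultA lines0) count ((k : Nat) : Int)
      = (if (pvStreamB lines0 count).2 then (pvStreamB lines0 count).1.getD k ""
         else (pvStreamB lines0 count).1.getD 0 "") := by
  unfold pvStreamB pvDefaultA pvValA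
  by_cases h : lines0.length ≥ count
  · have hne : lines0 ≠ [] := by
      intro he; subst he; simp at h; omega
    have h0 : lines0.length ≠ 0 := by simpa using hne
    simp [h, h0, PySem.List.pyGetD_natCast]
  · by_cases hne : lines0 = []
    · subst hne
      by_cases h1 : count = 1
      · subst h1
        interval_cases k
        simp [List.getD]
      · have h2 : ¬ count ≤ 1 := by simp at h; omega
        simp [h2, show count ≠ 0 by omega]
    · have h0 : lines0.length ≠ 0 := by simpa using hne
      simp only [if_neg h0, if_neg h, if_neg hne, Bool.false_eq_true, if_false, List.getD_cons_zero]
      by_cases h1 : lines0.length = 1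
      · obtain ⟨x, rfl⟩ := List.length_eq_one_iff.mp h1
        simp [PySem.List.pyGetD_neg_one _ _ hne]
      · simp [h1]

-- ===== VERDICT (by name: the statement is the Claim_ definition above) =====
theorem split_multiline_row_by_time_spec : Claim_equal_split_multiline_row_by_time := by
  intro row col_index _ _
  unfold Spec_split_multiline_row_by_time
  unfold split_multiline_row_by_time split_multiline_row_by_time_alt
  have hcell : pvCellB = pvCellA := rfl
  have hlines : pvLinesB = pvLinesA := rfl
  simp only [hcell, hlines]
  by_cases hstrip : PySem.Str.strip (pvCellA row (((PySem.Dict.ofList col_index).get? "time_str").getD 0)) = ""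
  · rw [if_pos hstrip, if_pos hstrip]
  · rw [if_neg hstrip, if_neg hstrip]
    generalize pvCellA row (((PySem.Dict.ofList col_index).get? "time_str").getD 0) = raw at hstrip ⊢
    have hc : (pvLinesA raw).length
        = ((PySem.Str.split? raw "\n").getD []).countP (fun t => PySem.Str.strip t != "") := by
      simp [pvLinesA, List.countP_eq_length_filter]
    rw [hc]
    generalize ((PySem.Str.split? raw "\n").getD []).countP (fun t => PySem.Str.strip t != "") = count
    have hnd : ((PySem.Dict.ofList col_index).items.map Prod.fst).Nodup :=
      PySem.Dict.nodup_keys_ofList col_index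
    generalize hds : (PySem.Dict.ofList col_index).items = ds at hnd ⊢
    -- A's side: a map over the range, each row a map over the columns
    rw [PySem.List.foldl_append_singleton_eq_map]
    have hext : (ds.foldl (fun (ec : PySem.Dict String (List String)) kv =>
            ec.insert kv.1 (pvDefaultA (pvLinesA (pvCellA row kv.2)))) PySem.Dict.empty).items
          = ds.map (fun kv => (kv.1, pvDefaultA (pvLinesA (pvCellA row kv.2)))) := by
      rw [PySem.Dict.items_foldl_insert_fresh ds Prod.fst _ PySem.Dict.empty
            (fun a _ => PySem.Dict.contains_empty _) hnd]
      simp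
      rfl
    have hrow : ∀ (i : Int),
        (((ds.map (fun kv => (kv.1, pvDefaultA (pvLinesA (pvCellA row kv.2))))).foldl
            (fun (nr : PySem.Dict String String) kl => nr.insert kl.1 (pvValA kl.2 count i))
            PySem.Dict.empty).items)
          = ds.map (fun kv => (kv.1, pvValA (pvDefaultA (pvLinesA (pvCellA row kv.2))) count i)) := by
      intro i
      rw [PySem.Dict.items_foldl_insert_fresh _ Prod.fst (fun kl => pvValA kl.2 count i) _
            (fun a _ => PySem.Dict.contains_empty _)
            (by simpa [List.map_map, Function.comp_def] using hnd)]
      simp [List.map_map, Function.comp_def]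
      rfl
    -- B's side: the streams dict, then the loop characterisation
    have hstreams : (ds.foldl (fun (st : PySem.Dict String (List String × Bool)) kv =>
            st.insert kv.1 (pvStreamB (pvLinesA (pvCellA row kv.2)) count)) PySem.Dict.empty).items
          = ds.map (fun kv => (kv.1, pvStreamB (pvLinesA (pvCellA row kv.2)) count)) := by
      rw [PySem.Dict.items_foldl_insert_fresh ds Prod.fst _ PySem.Dict.empty
            (fun a _ => PySem.Dict.contains_empty _) hnd]
      simp
      rfl
    simp only [hext, hstreams, pv_loop_eq, List.nil_append]
    rw [PySem.List.pyRange_one, List.map_map]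
    apply List.map_congr_left
    intro k hk
    have hkc : k < count := List.mem_range.mp hk
    simp only [Function.comp, hrow, List.map_map]
    apply List.map_congr_left
    intro kv _
    have := pv_cell_eq (pvLinesA (pvCellA row kv.2)) count k hkc
    simp only [Function.comp]
    rw [show ((0:Int) + (k:Int)) = ((k:Nat):Int) by omega]
    exact congrArg (Prod.mk kv.1) this
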